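-- pv_equiv track=rewrite | github.com/tomassirne/Parcial1Programacion1 | parcial.py | separa_tipos
-- ===== SOURCE A (Python) =====
-- def separa_tipos(divorcios):
--     #Creo un dic para cada tipo de matrimonio:
--     # m -> masculino, f -> femenino, n-> no declara
--     dic_mm = {}
--     dic_ff = {}
--     dic_mf = {}
--     dic_nn = {}
--     dic_fn = {}
--     dic_mn = {}
--
--     for k,v in divorcios.items():
--         if "Masculino" in k:
--             if "Femenino" in k: dic_mf[k] = v
--             elif "No declara" in k or "X" in k or "Indefinido" in k : dic_mn[k] = v
--             else: dic_mm[k] = v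
--         elif "Femenino" in k :
--             if "No declara" in k or "X" in k or "Indefinido" in k : dic_fn[k] = v
--             else: dic_ff[k] = v
--         else: dic_nn[k] = v
--
--     return dic_mm,dic_ff,dic_mf,dic_nn,dic_fn,dic_mn
-- ===== SOURCE B (Python) =====
-- def separa_tipos(divorcios):
--     # Six staged passes: each bucket is built independently by one dict
--     # comprehension filtering on a predicate over three substring flags.
--     def flags(k):
--         m = "Masculino" in k
--         f = "Femenino" in k
--         n = "No declara" in k or "X" in k or "Indefinido" in k
--         return m, f, n
--     def pick(pred):
--         return {k: v for k, v in divorcios.items() if pred(*flags(k))}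
--     dic_mm = pick(lambda m, f, n: m and not f and not n)
--     dic_ff = pick(lambda m, f, n: f and not m and not n)
--     dic_mf = pick(lambda m, f, n: m and f)
--     dic_nn = pick(lambda m, f, n: not m and not f)
--     dic_fn = pick(lambda m, f, n: f and not m and n)
--     dic_mn = pick(lambda m, f, n: m and not f and n)
--     return dic_mm, dic_ff, dic_mf, dic_nn, dic_fn, dic_mn
-- ===== Notes on version B (the rewrite author's own statement) =====
-- stated objective: alternative
-- what changed: Replaces the single pass with a nested if/elif dispatch into six mutable dicts by six independent staged passes, each building one bucket with a dict comprehension filtering on a predicate over three substring flags.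
import Mathlib
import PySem

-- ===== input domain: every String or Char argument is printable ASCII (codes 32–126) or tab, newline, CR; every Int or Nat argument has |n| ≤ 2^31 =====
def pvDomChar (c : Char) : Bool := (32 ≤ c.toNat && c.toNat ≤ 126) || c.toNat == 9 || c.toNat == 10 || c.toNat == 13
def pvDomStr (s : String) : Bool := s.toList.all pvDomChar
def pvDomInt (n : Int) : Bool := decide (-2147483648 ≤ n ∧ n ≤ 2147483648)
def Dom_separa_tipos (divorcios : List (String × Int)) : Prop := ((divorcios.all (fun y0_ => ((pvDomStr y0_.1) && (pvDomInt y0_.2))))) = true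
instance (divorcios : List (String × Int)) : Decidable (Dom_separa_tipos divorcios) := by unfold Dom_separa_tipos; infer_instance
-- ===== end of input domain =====

-- B replaces A's single dispatching pass by six independent filter passes, one per bucket (alternative decomposition, same results).

-- ===== PORT A =====
-- A: one pass, nested if/elif chain choosing which of six mutable dicts gets the pair.
def pvStepA (st : PySem.Dict String Int × PySem.Dict String Int × PySem.Dict String Int × PySem.Dict String Int × PySem.Dict String Int × PySem.Dict String Int) (kv : String × Int) : PySem.Dict String Int × PySem.Dict String Int × PySem.Dict String Int × PySem.Dict String Int × PySem.Dict String Int × PySem.Dict String Int :=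
  let (mm, ff, mf, nn, fn, mn) := st
  let k := kv.1
  let v := kv.2
  if PySem.Str.isIn "Masculino" k then
    if PySem.Str.isIn "Femenino" k then (mm, ff, mf.insert k v, nn, fn, mn)
    else if PySem.Str.isIn "No declara" k || PySem.Str.isIn "X" k || PySem.Str.isIn "Indefinido" k then
      (mm, ff, mf, nn, fn, mn.insert k v)
    else (mm.insert k v, ff, mf, nn, fn, mn)
  else if PySem.Str.isIn "Femenino" k then
    if PySem.Str.isIn "No declara" k || PySem.Str.isIn "X" k || PySem.Str.isIn "Indefinido" k then
      (mm, ff, mf, nn, fn.insert k v, mn)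
    else (mm, ff.insert k v, mf, nn, fn, mn)
  else (mm, ff, mf, nn.insert k v, fn, mn)

def separa_tipos (divorcios : List (String × Int)) : (List (String × Int)) × (List (String × Int)) × (List (String × Int)) × (List (String × Int)) × (List (String × Int)) × (List (String × Int)) :=
  let r := divorcios.foldl pvStepA (.empty, .empty, .empty, .empty, .empty, .empty)
  (r.1.items, r.2.1.items, r.2.2.1.items, r.2.2.2.1.items, r.2.2.2.2.1.items, r.2.2.2.2.2.items)

-- ===== PORT B =====
-- B: flags k = (m, f, n); pick pred = the dict comprehension over divorcios filtered by pred on the flags.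
def pvFlags (k : String) : Bool × Bool × Bool :=
  (PySem.Str.isIn "Masculino" k, PySem.Str.isIn "Femenino" k,
   PySem.Str.isIn "No declara" k || PySem.Str.isIn "X" k || PySem.Str.isIn "Indefinido" k)

def pvPick (divorcios : List (String × Int)) (pred : Bool → Bool → Bool → Bool) : PySem.Dict String Int :=
  (divorcios.filter (fun kv => (fun p => pred p.1 p.2.1 p.2.2) (pvFlags kv.1))).foldl
    (fun d kv => d.insert kv.1 kv.2) .empty

def separa_tipos_alt (divorcios : List (String × Int)) : (List (String × Int)) × (List (String × Int)) × (List (String × Int)) × (List (String × Int)) × (List (String × Int)) × (List (String × Int)) :=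
  ((pvPick divorcios (fun m f n => m && !f && !n)).items,
   (pvPick divorcios (fun m f n => f && !m && !n)).items,
   (pvPick divorcios (fun m f _ => m && f)).items,
   (pvPick divorcios (fun m f _ => !m && !f)).items,
   (pvPick divorcios (fun m f n => f && !m && n)).items,
   (pvPick divorcios (fun m f n => m && !f && n)).items)

-- ===== PRECONDITION & SPEC =====
def Spec_separa_tipos (divorcios : List (String × Int)) (out : (List (String × Int)) × (List (String × Int)) × (List (String × Int)) × (List (String × Int)) × (List (String × Int)) × (List (String × Int))) : Prop := out = separa_tipos_alt divorcios
instance (divorcios : List (String × Int)) (out : (List (String × Int)) × (List (String × Int)) × (List (String × Int)) × (List (String × Int)) × (List (String × Int)) × (List (String × Int))) : Decidable (Spec_separa_tipos divorcios out) := by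
  unfold Spec_separa_tipos
  haveI d2 : DecidableEq (List (String × Int) × List (String × Int)) := instDecidableEqProd
  haveI d3 : DecidableEq (List (String × Int) × List (String × Int) × List (String × Int)) := instDecidableEqProd
  haveI d4 : DecidableEq (List (String × Int) × List (String × Int) × List (String × Int) × List (String × Int)) := instDecidableEqProd
  haveI d5 : DecidableEq (List (String × Int) × List (String × Int) × List (String × Int) × List (String × Int) × List (String × Int)) := instDecidableEqProd
  exact instDecidableEqProd _ _

-- ===== CLAIM (what is proved, stated in full; the proofs are below) =====
def Claim_equal_separa_tipos : Prop := ∀ (divorcios : List (String × Int)), Dom_separa_tipos divorcios → Spec_separa_tipos divorcios (separa_tipos divorcios)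

-- ===== LEMMAS AND PROOFS =====

-- A's fold over the whole list equals, componentwise, B's insert-fold over the list filtered by each bucket's predicate.
theorem pv_fold_decompose (l : List (String × Int)) :
    ∀ a b c d e f : PySem.Dict String Int,
    List.foldl pvStepA (a, b, c, d, e, f) l =
      ((l.filter (fun kv => (fun p : Bool × Bool × Bool => p.1 && !p.2.1 && !p.2.2) (pvFlags kv.1))).foldl (fun d kv => d.insert kv.1 kv.2) a,
       (l.filter (fun kv => (fun p : Bool × Bool × Bool => p.2.1 && !p.1 && !p.2.2) (pvFlags kv.1))).foldl (fun d kv => d.insert kv.1 kv.2) b,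
       (l.filter (fun kv => (fun p : Bool × Bool × Bool => p.1 && p.2.1) (pvFlags kv.1))).foldl (fun d kv => d.insert kv.1 kv.2) c,
       (l.filter (fun kv => (fun p : Bool × Bool × Bool => !p.1 && !p.2.1) (pvFlags kv.1))).foldl (fun d kv => d.insert kv.1 kv.2) d,
       (l.filter (fun kv => (fun p : Bool × Bool × Bool => p.2.1 && !p.1 && p.2.2) (pvFlags kv.1))).foldl (fun d kv => d.insert kv.1 kv.2) e,
       (l.filter (fun kv => (fun p : Bool × Bool × Bool => p.1 && !p.2.1 && p.2.2) (pvFlags kv.1))).foldl (fun d kv => d.insert kv.1 kv.2) f) := by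
  induction l with
  | nil => intro a b c d e f; rfl
  | cons kv t ih =>
    intro a b c d e f
    cases hm : PySem.Str.isIn "Masculino" kv.1 <;>
    cases hf : PySem.Str.isIn "Femenino" kv.1 <;>
    cases hn : (PySem.Str.isIn "No declara" kv.1 || PySem.Str.isIn "X" kv.1 || PySem.Str.isIn "Indefinido" kv.1) <;>
      simp only [List.foldl_cons, List.filter_cons, pvStepA, pvFlags, hm, hf, hn,
        Bool.not_true, Bool.not_false, Bool.false_and, Bool.and_true,
        Bool.and_false, if_true] <;>
      exact ih _ _ _ _ _ _

-- ===== VERDICT (by name: the statement is the Claim_ definition above) =====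
theorem separa_tipos_spec : Claim_equal_separa_tipos := by
  intro divorcios _
  unfold Spec_separa_tipos separa_tipos separa_tipos_alt pvPick
  rw [pv_fold_decompose]
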